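-- pv_equiv track=rewrite | github.com/uoe-agents/SaMI | envs/PandaHook.py | states_to_result
-- ===== SOURCE A (Python) =====
-- def states_to_result(states):
--     for state in states:
--         if 'pickandplace' in state:
--             return 'pickandplace'
--     for state in states:
--         if 'roll' in state:
--             return 'roll'
--     return 'push'
-- ===== SOURCE B (Python) =====
-- def states_to_result(states):
--     saw_roll = False
--     for state in states:
--         if 'pickandplace' in state:
--             return 'pickandplace'
--         elif 'roll' in state:
--             saw_roll = True
--     return 'roll' if saw_roll else 'push'
-- ===== Notes on version B (the rewrite author's own statement) =====
-- stated objective: simpler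
-- what changed: A's two separate priority scans over states are collapsed into a single pass that returns 'pickandplace' immediately and maintains a saw_roll flag, deciding 'roll' vs 'push' after the loop.
import Mathlib
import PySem

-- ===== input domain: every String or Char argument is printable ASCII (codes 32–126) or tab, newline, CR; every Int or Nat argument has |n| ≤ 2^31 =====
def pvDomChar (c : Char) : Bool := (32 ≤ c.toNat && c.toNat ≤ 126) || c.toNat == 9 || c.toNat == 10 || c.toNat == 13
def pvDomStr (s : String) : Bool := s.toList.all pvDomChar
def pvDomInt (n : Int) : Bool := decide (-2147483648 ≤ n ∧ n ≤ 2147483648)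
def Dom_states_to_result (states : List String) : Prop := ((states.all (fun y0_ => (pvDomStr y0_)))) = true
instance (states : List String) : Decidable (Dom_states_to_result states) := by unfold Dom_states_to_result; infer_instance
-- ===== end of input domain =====

-- B collapses A's two priority scans into one pass with a saw_roll flag (objective: simpler).

-- ===== PORT A =====
-- first loop: return 'pickandplace' on the first state containing it
def pvScanPick : List String → Option String
  | [] => none
  | s :: rest => if PySem.Str.isIn "pickandplace" s then some "pickandplace" else pvScanPick rest

-- second loop: return 'roll' on the first state containing it
def pvScanRoll : List String → Option String
  | [] => none
  | s :: rest => if PySem.Str.isIn "roll" s then some "roll" else pvScanRoll rest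

def states_to_result (states : List String) : String :=
  match pvScanPick states with
  | some r => r
  | none =>
    match pvScanRoll states with
    | some r => r
    | none => "push"

-- ===== PORT B =====
-- single pass carrying the saw_roll flag
def pvAltGo : List String → Bool → String
  | [], sawRoll => if sawRoll then "roll" else "push"
  | s :: rest, sawRoll =>
    if PySem.Str.isIn "pickandplace" s then "pickandplace"
    else if PySem.Str.isIn "roll" s then pvAltGo rest true
    else pvAltGo rest sawRoll

def states_to_result_alt (states : List String) : String :=
  pvAltGo states false

-- ===== PRECONDITION & SPEC =====
def Spec_states_to_result (states : List String) (out : String) : Prop := out = states_to_result_alt states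
instance (states : List String) (out : String) : Decidable (Spec_states_to_result states out) := by unfold Spec_states_to_result; infer_instance

-- ===== CLAIM (what is proved, stated in full; the proofs are below) =====
def Claim_equal_states_to_result : Prop := ∀ (states : List String), Dom_states_to_result states → Spec_states_to_result states (states_to_result states)

-- ===== LEMMAS AND PROOFS =====
theorem pvAltGo_eq (states : List String) (sawRoll : Bool) :
    pvAltGo states sawRoll =
      (match pvScanPick states with
       | some r => r
       | none =>
         if sawRoll then "roll"
         else match pvScanRoll states with
              | some r => r
              | none => "push") := by
  induction states generalizing sawRoll with
  | nil => cases sawRoll <;> simp [pvAltGo, pvScanPick, pvScanRoll]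
  | cons s rest ih =>
    simp only [pvAltGo, pvScanPick, pvScanRoll, PySem.Str.isIn_eq]
    by_cases hp : PySem.Chars.isIn ['p','i','c','k','a','n','d','p','l','a','c','e'] s.toList = true
    · simp [hp]
    · by_cases hr : PySem.Chars.isIn ['r','o','l','l'] s.toList = true
      · cases sawRoll <;> simp [hp, hr, ih]
      · simp [hp, hr, ih]

-- ===== VERDICT (by name: the statement is the Claim_ definition above) =====
theorem states_to_result_spec : Claim_equal_states_to_result := by
  intro states _
  unfold Spec_states_to_result states_to_result states_to_result_alt
  rw [pvAltGo_eq]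
  simp
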